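-- pv_equiv track=rewrite | github.com/areddish/aoc2020 | day12/day12.py | turn_left
-- ===== SOURCE A (Python) =====
-- EAST = (1, 0)
--
-- WEST = (-1, 0)
--
-- SOUTH = (0, -1)
--
-- NORTH = (0, 1)
--
-- def turn_left(dir, times):
--     for x in range(times):
--         if dir == NORTH:
--             dir = WEST
--         elif dir == WEST:
--             dir = SOUTH
--         elif dir == SOUTH:
--             dir = EAST
--         elif dir == EAST:
--             dir = NORTH
--     return dir
-- ===== SOURCE B (Python) =====
-- EAST = (1, 0)
-- WEST = (-1, 0)
-- SOUTH = (0, -1)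
-- NORTH = (0, 1)
--
-- _CYCLE = [NORTH, WEST, SOUTH, EAST]
--
-- def turn_left(dir, times):
--     if times <= 0 or dir not in _CYCLE:
--         return dir
--     return _CYCLE[(_CYCLE.index(dir) + times) % 4]
-- ===== Notes on version B (the rewrite author's own statement) =====
-- stated objective: faster
-- what changed: Replaces the step-by-step loop of 'times' single 90-degree turns by a direct lookup in the 4-cycle [NORTH,WEST,SOUTH,EAST] at index (index(dir)+times) % 4.
import Mathlib
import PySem

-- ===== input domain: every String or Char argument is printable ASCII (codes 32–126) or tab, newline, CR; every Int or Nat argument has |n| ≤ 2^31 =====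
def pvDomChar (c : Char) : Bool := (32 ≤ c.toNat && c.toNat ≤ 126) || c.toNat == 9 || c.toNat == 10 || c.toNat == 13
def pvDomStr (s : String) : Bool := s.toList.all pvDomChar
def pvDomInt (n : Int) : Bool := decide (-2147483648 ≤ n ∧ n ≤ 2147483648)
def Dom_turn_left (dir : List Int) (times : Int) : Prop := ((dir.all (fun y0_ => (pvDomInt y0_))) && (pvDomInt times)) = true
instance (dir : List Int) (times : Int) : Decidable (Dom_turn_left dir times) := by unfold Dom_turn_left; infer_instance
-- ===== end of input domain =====

-- B replaces A's loop of `times` single left turns by one O(1) lookup in the 4-cycle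
-- [NORTH, WEST, SOUTH, EAST] at index (index(dir) + times) % 4.

-- ===== PORT A =====
-- the body of A's loop (the if/elif chain), as a named helper
def pvStep (d : List Int) : List Int :=
  if d = [0, 1] then [-1, 0]          -- NORTH -> WEST
  else if d = [-1, 0] then [0, -1]    -- WEST  -> SOUTH
  else if d = [0, -1] then [1, 0]     -- SOUTH -> EAST
  else if d = [1, 0] then [0, 1]      -- EAST  -> NORTH
  else d

def turn_left (dir : List Int) (times : Int) : List Int :=
  (PySem.List.pyRange 0 times 1).foldl (fun d _ => pvStep d) dir

-- ===== PORT B =====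
def pvCycle : List (List Int) := [[0, 1], [-1, 0], [0, -1], [1, 0]]

def turn_left_alt (dir : List Int) (times : Int) : List Int :=
  if times ≤ 0 ∨ dir ∉ pvCycle then dir
  else
    let i : Nat := (PySem.List.index? pvCycle dir).getD 0
    (PySem.List.pyGet? pvCycle (PySem.Int.mod ((i : Int) + times) 4)).getD dir

-- ===== PRECONDITION & SPEC =====
def Spec_turn_left (dir : List Int) (times : Int) (out : List Int) : Prop := out = turn_left_alt dir times
instance (dir : List Int) (times : Int) (out : List Int) : Decidable (Spec_turn_left dir times out) := by unfold Spec_turn_left; infer_instance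

-- ===== CLAIM (what is proved, stated in full; the proofs are below) =====
def Claim_equal_turn_left : Prop := ∀ (dir : List Int) (times : Int), Dom_turn_left dir times → Spec_turn_left dir times (turn_left dir times)

-- ===== LEMMAS AND PROOFS =====

lemma foldl_step_eq_iterate (xs : List Int) (d : List Int) :
    xs.foldl (fun d _ => pvStep d) d = pvStep^[xs.length] d := by
  induction xs generalizing d with
  | nil => rfl
  | cons x xs ih => simp [List.foldl_cons, ih, Function.iterate_succ_apply]

lemma step_iter_notin (dir : List Int) (h : dir ∉ pvCycle) (n : Nat) :
    pvStep^[n] dir = dir := by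
  have hs : pvStep dir = dir := by
    simp [pvCycle] at h
    simp [pvStep, h.1, h.2.1, h.2.2.1, h.2.2.2]
  induction n with
  | zero => rfl
  | succ n ih => rw [Function.iterate_succ_apply', ih, hs]

lemma step_iter_cycle (n i : Nat) (hi : i < 4) :
    pvStep^[n] (pvCycle.getD i []) = pvCycle.getD ((i + n) % 4) [] := by
  induction n with
  | zero =>
    have h0 : (i + 0) % 4 = i := by omega
    rw [h0]; rfl
  | succ n ih =>
    rw [Function.iterate_succ_apply', ih]
    have hm : (i + n) % 4 = 0 ∨ (i + n) % 4 = 1 ∨ (i + n) % 4 = 2 ∨ (i + n) % 4 = 3 := by omega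
    rcases hm with h | h | h | h <;>
      · rw [h]
        have : (i + (n + 1)) % 4 = ((i + n) % 4 + 1) % 4 := by omega
        rw [this, h]
        decide

lemma mod_cast_eq (i : Nat) (times : Int) (h : 0 < times) :
    PySem.Int.mod ((i : Int) + times) 4 = (((i + times.toNat) % 4 : Nat) : Int) := by
  have : ((i : Int) + times) = (((i + times.toNat : Nat)) : Int) := by omega
  rw [this]
  exact_mod_cast PySem.Int.mod_natCast (i + times.toNat) 4

lemma pvPerCase (k : Nat) (hk : k < 4) (times : Int) (ht : 0 < times) :
    pvStep^[times.toNat] (pvCycle.getD k []) =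
      (PySem.List.pyGet? pvCycle
        (PySem.Int.mod ((((PySem.List.index? pvCycle (pvCycle.getD k [])).getD 0 : Nat) : Int) + times) 4)).getD
        (pvCycle.getD k []) := by
  have hidx : (PySem.List.index? pvCycle (pvCycle.getD k [])).getD 0 = k := by
    interval_cases k <;> decide
  rw [hidx, step_iter_cycle _ k hk, mod_cast_eq k times ht, PySem.List.pyGet?_natCast]
  have h4 : (k + times.toNat) % 4 < pvCycle.length := by
    have : (k + times.toNat) % 4 < 4 := by omega
    simpa [pvCycle] using this
  rw [List.getElem?_eq_getElem h4]
  simp [List.getD_eq_getElem?_getD, List.getElem?_eq_getElem h4]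

-- ===== VERDICT (by name: the statement is the Claim_ definition above) =====
theorem turn_left_spec : Claim_equal_turn_left := by
  intro dir times _
  unfold Spec_turn_left turn_left turn_left_alt
  rw [foldl_step_eq_iterate, PySem.List.length_pyRange_one]
  by_cases ht : times ≤ 0
  · have : (times - 0).toNat = 0 := by omega
    rw [this]
    simp [ht]
  · by_cases hm : dir ∈ pvCycle
    · rw [if_neg (by tauto)]
      have hlen : (times - 0).toNat = times.toNat := by omega
      rw [hlen]
      have ht' : 0 < times := by omega
      fin_cases hm
      · exact pvPerCase 0 (by omega) times ht'
      · exact pvPerCase 1 (by omega) times ht'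
      · exact pvPerCase 2 (by omega) times ht'
      · exact pvPerCase 3 (by omega) times ht' 
    · rw [step_iter_notin dir hm, if_pos (Or.inr hm)]
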